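-- pv_equiv track=rewrite | github.com/TortoiseHam/mcp-musescore | src/pitch.py | _ticks_to_duration
-- ===== SOURCE A (Python) =====
-- _TICKS_TABLE = [
--     (1920 * 4, "/0.25"),    # long
--     (1920 * 2, "/0.5"),     # breve
--     (1920, "/1"),            # whole
--     (960, "/2"),             # half
--     (480, "/4"),             # quarter
--     (240, "/8"),             # eighth
--     (120, "/16"),            # 16th
--     (60, "/32"),             # 32nd
--     (30, "/64"),             # 64th
-- ]
--
-- def _ticks_to_duration(ticks: int) -> str:
--     """Convert tick count to a duration string, handling dotted values."""
--     # Check for exact matches first (undotted)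
--     for t, s in _TICKS_TABLE:
--         if ticks == t:
--             return s
--
--     # Check for dotted values: dotted = base * 1.5, double-dotted = base * 1.75
--     for t, s in _TICKS_TABLE:
--         if ticks == t + t // 2:  # dotted
--             return s + "."
--         if ticks == t + t // 2 + t // 4:  # double-dotted
--             return s + ".."
--
--     # Fallback: show as tick count
--     return f"/{ticks}t"
-- ===== SOURCE B (Python) =====
-- _POWERS_OF_TWO = (1, 2, 4, 8, 16, 32, 64, 128, 256)
--
-- def _base_name(t: int):
--     """Duration string for an undotted base tick count (30 * 2**k), else None."""
--     if t % 30 or t // 30 not in _POWERS_OF_TWO: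
--         return None
--     if t <= 1920:
--         return f"/{1920 // t}"
--     return "/0.5" if t == 3840 else "/0.25"
--
-- def _ticks_to_duration(ticks: int) -> str:
--     """Convert tick count to a duration string, handling dotted values."""
--     s = _base_name(ticks)
--     if s is not None:
--         return s
--     # dotted value is base + base // 2 = 3 * base / 2 (every base is even)
--     if ticks % 3 == 0:
--         s = _base_name(2 * ticks // 3)
--         if s is not None:
--             return s + "."
--     # double-dotted value is base + base // 2 + base // 4 = floor(7 * base / 4)
--     base = (4 * ticks + 3) // 7
--     if 7 * base // 4 == ticks:
--         s = _base_name(base)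
--         if s is not None:
--             return s + ".."
--     return f"/{ticks}t"
-- ===== Notes on version B (the rewrite author's own statement) =====
-- stated objective: alternative
-- what changed: Replaces A's two scans over the string table with arithmetic: a helper recognises base tick counts (a multiple of the smallest base by a power of two) and derives their name by division, and dotted/double-dotted tick values are inverted algebraically back to their base instead of scanned for.
import Mathlib
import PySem

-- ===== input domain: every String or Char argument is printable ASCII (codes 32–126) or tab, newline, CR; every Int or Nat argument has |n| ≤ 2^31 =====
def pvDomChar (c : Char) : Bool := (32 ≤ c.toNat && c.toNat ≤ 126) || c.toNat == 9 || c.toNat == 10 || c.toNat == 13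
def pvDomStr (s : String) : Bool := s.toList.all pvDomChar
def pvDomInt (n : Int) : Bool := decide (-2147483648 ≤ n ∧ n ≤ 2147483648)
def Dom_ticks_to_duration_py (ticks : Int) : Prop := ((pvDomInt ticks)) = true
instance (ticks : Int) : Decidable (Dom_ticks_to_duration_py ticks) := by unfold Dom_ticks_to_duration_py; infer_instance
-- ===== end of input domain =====

-- B replaces A's two scans over the string table with pure arithmetic: it recognises
-- base tick counts (multiples of 30 whose quotient is a power of two), computes their
-- name from 1920 // t, and inverts dotted/double-dotted values algebraically (objective: alternative).

-- ===== PORT A =====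
def pvTicksTable : List (Int × String) :=
  [(1920 * 4, "/0.25"), (1920 * 2, "/0.5"), (1920, "/1"), (960, "/2"), (480, "/4"),
   (240, "/8"), (120, "/16"), (60, "/32"), (30, "/64")]

-- first loop of A: exact matches
def pvFindExact (ticks : Int) : List (Int × String) → Option String
  | [] => none
  | (t, s) :: rest => if ticks = t then some s else pvFindExact ticks rest

-- second loop of A: dotted, then double-dotted, per table row
def pvFindDotted (ticks : Int) : List (Int × String) → Option String
  | [] => none
  | (t, s) :: rest =>
    if ticks = t + PySem.Int.floordiv t 2 then some (s ++ ".")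
    else if ticks = t + PySem.Int.floordiv t 2 + PySem.Int.floordiv t 4 then some (s ++ "..")
    else pvFindDotted ticks rest

def ticks_to_duration_py (ticks : Int) : String :=
  match pvFindExact ticks pvTicksTable with
  | some s => s
  | none =>
    match pvFindDotted ticks pvTicksTable with
    | some s => s
    | none => "/" ++ PySem.Int.toStr ticks ++ "t"

-- ===== PORT B =====
def pvPowersOfTwo : List Int := [1, 2, 4, 8, 16, 32, 64, 128, 256]

-- duration string for an undotted base tick count (30 * 2^k), else none
def pvBaseName (t : Int) : Option String :=
  if PySem.Int.mod t 30 ≠ 0 ∨ PySem.Int.floordiv t 30 ∉ pvPowersOfTwo then none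
  else if t ≤ 1920 then some ("/" ++ PySem.Int.toStr (PySem.Int.floordiv 1920 t))
  else if t = 3840 then some "/0.5" else some "/0.25"

def ticks_to_duration_py_alt (ticks : Int) : String :=
  match pvBaseName ticks with
  | some s => s
  | none =>
    -- dotted value is base + base // 2 = 3 * base / 2 (every base is even)
    match (if PySem.Int.mod ticks 3 = 0 then pvBaseName (PySem.Int.floordiv (2 * ticks) 3) else none) with
    | some s => s ++ "."
    | none =>
      -- double-dotted value is base + base // 2 + base // 4 = floor(7 * base / 4)
      let base := PySem.Int.floordiv (4 * ticks + 3) 7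
      match (if PySem.Int.floordiv (7 * base) 4 = ticks then pvBaseName base else none) with
      | some s => s ++ ".."
      | none => "/" ++ PySem.Int.toStr ticks ++ "t"

-- ===== PRECONDITION & SPEC =====
def Spec_ticks_to_duration_py (ticks : Int) (out : String) : Prop := out = ticks_to_duration_py_alt ticks
instance (ticks : Int) (out : String) : Decidable (Spec_ticks_to_duration_py ticks out) := by unfold Spec_ticks_to_duration_py; infer_instance

-- ===== CLAIM (what is proved, stated in full; the proofs are below) =====
def Claim_equal_ticks_to_duration_py : Prop := ∀ (ticks : Int), Dom_ticks_to_duration_py ticks → Spec_ticks_to_duration_py ticks (ticks_to_duration_py ticks)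

-- ===== LEMMAS AND PROOFS =====

-- pvBaseName only returns a value on the nine base tick counts
theorem pvBaseName_none (t : Int)
    (h0 : t ≠ 30) (h1 : t ≠ 60) (h2 : t ≠ 120) (h3 : t ≠ 240) (h4 : t ≠ 480)
    (h5 : t ≠ 960) (h6 : t ≠ 1920) (h7 : t ≠ 3840) (h8 : t ≠ 7680) :
    pvBaseName t = none := by
  unfold pvBaseName
  rw [if_pos]
  by_contra hc
  push Not at hc
  obtain ⟨hm, hq⟩ := hc
  rw [PySem.Int.mod_eq_emod_of_pos (by norm_num)] at hm
  rw [PySem.Int.floordiv_eq_ediv_of_pos (by norm_num)] at hq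
  simp [pvPowersOfTwo] at hq
  rcases hq with h | h | h | h | h | h | h | h | h <;> omega

-- ===== VERDICT (by name: the statement is the Claim_ definition above) =====
set_option maxHeartbeats 2000000 in
theorem ticks_to_duration_py_spec : Claim_equal_ticks_to_duration_py := by
  intro ticks _
  unfold Spec_ticks_to_duration_py
  -- case split on the 27 tick counts with a named duration
  by_cases k0 : ticks = (30 : Int); · subst k0; decide
  by_cases k1 : ticks = (45 : Int); · subst k1; decide
  by_cases k2 : ticks = (52 : Int); · subst k2; decide
  by_cases k3 : ticks = (60 : Int); · subst k3; decide
  by_cases k4 : ticks = (90 : Int); · subst k4; decide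
  by_cases k5 : ticks = (105 : Int); · subst k5; decide
  by_cases k6 : ticks = (120 : Int); · subst k6; decide
  by_cases k7 : ticks = (180 : Int); · subst k7; decide
  by_cases k8 : ticks = (210 : Int); · subst k8; decide
  by_cases k9 : ticks = (240 : Int); · subst k9; decide
  by_cases k10 : ticks = (360 : Int); · subst k10; decide
  by_cases k11 : ticks = (420 : Int); · subst k11; decide
  by_cases k12 : ticks = (480 : Int); · subst k12; decide
  by_cases k13 : ticks = (720 : Int); · subst k13; decide
  by_cases k14 : ticks = (840 : Int); · subst k14; decide
  by_cases k15 : ticks = (960 : Int); · subst k15; decide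
  by_cases k16 : ticks = (1440 : Int); · subst k16; decide
  by_cases k17 : ticks = (1680 : Int); · subst k17; decide
  by_cases k18 : ticks = (1920 : Int); · subst k18; decide
  by_cases k19 : ticks = (2880 : Int); · subst k19; decide
  by_cases k20 : ticks = (3360 : Int); · subst k20; decide
  by_cases k21 : ticks = (3840 : Int); · subst k21; decide
  by_cases k22 : ticks = (5760 : Int); · subst k22; decide
  by_cases k23 : ticks = (6720 : Int); · subst k23; decide
  by_cases k24 : ticks = (7680 : Int); · subst k24; decide
  by_cases k25 : ticks = (11520 : Int); · subst k25; decide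
  by_cases k26 : ticks = (13440 : Int); · subst k26; decide
  -- otherwise both sides fall through to the "/<ticks>t" fallback
  have hA : ticks_to_duration_py ticks = "/" ++ PySem.Int.toStr ticks ++ "t" := by
    unfold ticks_to_duration_py
    have hex : pvFindExact ticks pvTicksTable = none := by
      simp only [pvFindExact, pvTicksTable]
      rw [show ((1920:Int)*4) = 7680 from by norm_num, show ((1920:Int)*2) = 3840 from by norm_num,
        if_neg k24, if_neg k21, if_neg k18, if_neg k15, if_neg k12, if_neg k9, if_neg k6, if_neg k3, if_neg k0]
    have hdot : pvFindDotted ticks pvTicksTable = none := by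
      simp only [pvFindDotted, pvTicksTable]
      rw [show ((1920:Int)*4) = 7680 from by norm_num, show ((1920:Int)*2) = 3840 from by norm_num,
        show (7680:Int) + PySem.Int.floordiv 7680 2 + PySem.Int.floordiv 7680 4 = 13440 from by decide,
        show (7680:Int) + PySem.Int.floordiv 7680 2 = 11520 from by decide,
        show (3840:Int) + PySem.Int.floordiv 3840 2 + PySem.Int.floordiv 3840 4 = 6720 from by decide,
        show (3840:Int) + PySem.Int.floordiv 3840 2 = 5760 from by decide,
        show (1920:Int) + PySem.Int.floordiv 1920 2 + PySem.Int.floordiv 1920 4 = 3360 from by decide,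
        show (1920:Int) + PySem.Int.floordiv 1920 2 = 2880 from by decide,
        show (960:Int) + PySem.Int.floordiv 960 2 + PySem.Int.floordiv 960 4 = 1680 from by decide,
        show (960:Int) + PySem.Int.floordiv 960 2 = 1440 from by decide,
        show (480:Int) + PySem.Int.floordiv 480 2 + PySem.Int.floordiv 480 4 = 840 from by decide,
        show (480:Int) + PySem.Int.floordiv 480 2 = 720 from by decide,
        show (240:Int) + PySem.Int.floordiv 240 2 + PySem.Int.floordiv 240 4 = 420 from by decide,
        show (240:Int) + PySem.Int.floordiv 240 2 = 360 from by decide,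
        show (120:Int) + PySem.Int.floordiv 120 2 + PySem.Int.floordiv 120 4 = 210 from by decide,
        show (120:Int) + PySem.Int.floordiv 120 2 = 180 from by decide,
        show (60:Int) + PySem.Int.floordiv 60 2 + PySem.Int.floordiv 60 4 = 105 from by decide,
        show (60:Int) + PySem.Int.floordiv 60 2 = 90 from by decide,
        show (30:Int) + PySem.Int.floordiv 30 2 + PySem.Int.floordiv 30 4 = 52 from by decide,
        show (30:Int) + PySem.Int.floordiv 30 2 = 45 from by decide,
        if_neg k25, if_neg k26, if_neg k22, if_neg k23, if_neg k19, if_neg k20, if_neg k16, if_neg k17,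
        if_neg k13, if_neg k14, if_neg k10, if_neg k11, if_neg k7, if_neg k8, if_neg k4, if_neg k5,
        if_neg k1, if_neg k2]
    rw [hex, hdot]
  have hB : ticks_to_duration_py_alt ticks = "/" ++ PySem.Int.toStr ticks ++ "t" := by
    unfold ticks_to_duration_py_alt
    rw [pvBaseName_none ticks k0 k3 k6 k9 k12 k15 k18 k21 k24]
    have hd : (if PySem.Int.mod ticks 3 = 0 then pvBaseName (PySem.Int.floordiv (2 * ticks) 3) else none) = none := by
      split_ifs with hm
      · apply pvBaseName_none <;>
        · rw [PySem.Int.floordiv_eq_ediv_of_pos (by norm_num : (0:Int) < 3)]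
          rw [PySem.Int.mod_eq_emod_of_pos (by norm_num : (0:Int) < 3)] at hm
          omega
      · rfl
    rw [hd]
    have hdd : (if PySem.Int.floordiv (7 * PySem.Int.floordiv (4 * ticks + 3) 7) 4 = ticks
        then pvBaseName (PySem.Int.floordiv (4 * ticks + 3) 7) else none) = none := by
      split_ifs with hm
      · apply pvBaseName_none <;>
        · rw [PySem.Int.floordiv_eq_ediv_of_pos (by norm_num : (0:Int) < 7)]
          rw [PySem.Int.floordiv_eq_ediv_of_pos (by norm_num : (0:Int) < 4),
            PySem.Int.floordiv_eq_ediv_of_pos (by norm_num : (0:Int) < 7)] at hm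
          omega
      · rfl
    simp only [hdd]
  rw [hA, hB]
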